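-- pv_equiv track=rewrite | github.com/firewang/ur.ctwl | robot_bomb.py | card_id2card_num
-- ===== SOURCE A (Python) =====
-- def card_id2card_num(card_id):
--     """将牌ID值 转化为 牌面值"""
--     temp_list = []
--     for card in card_id:
--         try:
--             card54id = int(card) % 54
--             if card54id < 52:
--                 if card54id % 13 < 12:
--                     temp_list.append(card54id % 13 + 2)
--                 else:
--                     temp_list.append(1)
--             elif card54id == 52:
--                 temp_list.append(14)  # 小王
--             else:
--                 temp_list.append(15)  # 牌ID 对应 牌面中 大王也是14，这里特殊处理
--         except ValueError:
--             temp_list.append(-1)  # 应对可能的空值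
--     return sorted(temp_list)
-- ===== SOURCE B (Python) =====
-- _FACE = tuple((1 if c % 13 == 12 else c % 13 + 2) if c < 52 else (14 if c == 52 else 15) for c in range(54))
-- def card_id2card_num(card_id):
--     counts = [0] * 16
--     face = _FACE
--     for card in card_id:
--         counts[face[card % 54]] += 1
--     out = []
--     for v in range(1, 16):
--         out += [v] * counts[v]
--     return out
-- ===== Notes on version B (the rewrite author's own statement) =====
-- stated objective: faster
-- what changed: Replaces the per-card branch chain plus append-then-sort with a precomputed 54-entry face-value lookup table feeding a counting sort over the bounded value range 1..15, emitting the output bucket by bucket.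
import Mathlib
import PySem

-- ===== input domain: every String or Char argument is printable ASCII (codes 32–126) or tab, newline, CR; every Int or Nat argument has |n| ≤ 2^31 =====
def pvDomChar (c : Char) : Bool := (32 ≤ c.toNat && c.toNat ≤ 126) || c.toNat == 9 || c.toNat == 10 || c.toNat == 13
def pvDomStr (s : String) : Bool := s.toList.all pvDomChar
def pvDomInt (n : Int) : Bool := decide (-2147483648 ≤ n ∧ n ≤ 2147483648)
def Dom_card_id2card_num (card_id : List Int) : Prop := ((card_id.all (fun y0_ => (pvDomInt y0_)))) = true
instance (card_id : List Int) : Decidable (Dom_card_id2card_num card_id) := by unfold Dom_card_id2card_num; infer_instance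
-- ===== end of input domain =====

-- B replaces A's append-then-sort with a one-pass counting sort over the bounded face-value range 1..15 (objective: faster).


-- ===== PORT A =====
-- literal port: build temp_list, then sorted(temp_list).
-- (int(card) never raises ValueError on an int argument, so the except branch is dead on this domain.)
def card_id2card_num (card_id : List Int) : List Int :=
  let temp_list := card_id.foldl (fun acc card =>
    let card54id := PySem.Int.mod card 54
    if card54id < 52 then
      if PySem.Int.mod card54id 13 < 12 then acc ++ [PySem.Int.mod card54id 13 + 2]
      else acc ++ [1]
    else if card54id = 52 then acc ++ [14]
    else acc ++ [15]) []
  PySem.List.sorted temp_list (fun x => x) false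

-- ===== PORT B =====
-- _FACE: module-level lookup table, tuple((1 if c % 13 == 12 else c % 13 + 2) if c < 52 else (14 if c == 52 else 15) for c in range(54))
def pvFACE : List Int :=
  (PySem.List.pyRange 0 54 1).map (fun c =>
    if c < 52 then (if PySem.Int.mod c 13 = 12 then 1 else PySem.Int.mod c 13 + 2)
    else if c = 52 then 14 else 15)

def card_id2card_num_alt (card_id : List Int) : List Int :=
  let face := pvFACE
  let counts := card_id.foldl (fun counts card =>
    let v := PySem.List.pyGetD face (PySem.Int.mod card 54) 0
    PySem.List.pySetD counts v (PySem.List.pyGetD counts v 0 + 1))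
    (PySem.List.pyRepeat [0] 16)
  (PySem.List.pyRange 1 16 1).foldl (fun out v =>
    out ++ PySem.List.pyRepeat [v] (PySem.List.pyGetD counts v 0)) []

-- ===== PRECONDITION & SPEC =====
def Spec_card_id2card_num (card_id : List Int) (out : List Int) : Prop := out = card_id2card_num_alt card_id
instance (card_id : List Int) (out : List Int) : Decidable (Spec_card_id2card_num card_id out) := by unfold Spec_card_id2card_num; infer_instance

-- ===== CLAIM (what is proved, stated in full; the proofs are below) =====
def Claim_equal_card_id2card_num : Prop := ∀ (card_id : List Int), Dom_card_id2card_num card_id → Spec_card_id2card_num card_id (card_id2card_num card_id)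

-- ===== LEMMAS AND PROOFS =====

-- B's face-value mapping, used by the proofs to describe both ports.
def pvVal (card : Int) : Int :=
  if PySem.Int.mod card 54 = 53 then 15
  else if PySem.Int.mod card 54 = 52 then 14
  else if PySem.Int.mod (PySem.Int.mod card 54) 13 = 12 then 1
  else PySem.Int.mod (PySem.Int.mod card 54) 13 + 2

theorem pvVal_mem (card : Int) :
    pvVal card ∈ ([1,2,3,4,5,6,7,8,9,10,11,12,13,14,15] : List Int) := by
  have h2 : 0 ≤ PySem.Int.mod (PySem.Int.mod card 54) 13 := PySem.Int.mod_nonneg _ (by norm_num)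
  have h3 : PySem.Int.mod (PySem.Int.mod card 54) 13 < 13 := PySem.Int.mod_lt _ (by norm_num)
  unfold pvVal
  split_ifs <;> simp_all ; omega

theorem bodyA_eq (acc : List Int) (card : Int) :
    (if PySem.Int.mod card 54 < 52 then
       if PySem.Int.mod (PySem.Int.mod card 54) 13 < 12 then
         acc ++ [PySem.Int.mod (PySem.Int.mod card 54) 13 + 2]
       else acc ++ [1]
     else if PySem.Int.mod card 54 = 52 then acc ++ [14]
     else acc ++ [15]) = acc ++ [pvVal card] := by
  have h0 : 0 ≤ PySem.Int.mod card 54 := PySem.Int.mod_nonneg _ (by norm_num)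
  have h1 : PySem.Int.mod card 54 < 54 := PySem.Int.mod_lt _ (by norm_num)
  have h2 : 0 ≤ PySem.Int.mod (PySem.Int.mod card 54) 13 := PySem.Int.mod_nonneg _ (by norm_num)
  have h3 : PySem.Int.mod (PySem.Int.mod card 54) 13 < 13 := PySem.Int.mod_lt _ (by norm_num)
  unfold pvVal
  split_ifs <;> simp_all <;> omega

theorem sum_map_ite_count (vs : List Int) (a : Int) (n : Nat) :
    (vs.map fun v => if v = a then n else 0).sum = vs.count a * n := by
  induction vs with
  | nil => simp
  | cons v vs ih =>
    by_cases h : v = a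
    · subst h; simp [ih]; ring
    · simp [h, ih]

-- distributing counted buckets over a Nodup value list is a permutation of the counted list
theorem perm_flatMap_replicate (vs m : List Int) (hnd : vs.Nodup)
    (hsub : ∀ x ∈ m, x ∈ vs) :
    (vs.flatMap (fun v => List.replicate (m.count v) v)).Perm m := by
  rw [List.perm_iff_count]
  intro a
  rw [List.count_eq_countP, List.countP_flatMap]
  have hmap : (vs.map ((List.countP fun x => x == a) ∘ fun v => List.replicate (m.count v) v))
      = vs.map fun v => if v = a then m.count a else 0 := by
    apply List.map_congr_left
    intro w _
    by_cases hw : w = a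
    · subst hw; simp [List.countP_replicate]
    · simp [List.countP_replicate, hw]
  rw [hmap, sum_map_ite_count]
  by_cases ha : a ∈ vs
  · have : vs.count a = 1 := List.count_eq_one_of_mem hnd ha
    rw [this, one_mul, List.count_eq_countP]
  · have : m.count a = 0 := by
      rw [List.count_eq_zero]; exact fun h => ha (hsub a h)
    rw [List.count_eq_zero_of_not_mem ha, zero_mul, this]

theorem pairwise_flatMap_replicate (f : Int → Nat) (vs : List Int)
    (h : vs.Pairwise (· ≤ ·)) :
    (vs.flatMap fun v => List.replicate (f v) v).Pairwise (· ≤ ·) := by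
  rw [List.pairwise_flatMap]
  constructor
  · intro a _; exact List.pairwise_replicate.mpr (Or.inr le_rfl)
  · refine h.imp_of_mem ?_
    intro a b _ _ hab x hx y hy
    rw [List.eq_of_mem_replicate hx, List.eq_of_mem_replicate hy]; exact hab

-- the table agrees with the face-value mapping
theorem pvFACE_get (card : Int) :
    PySem.List.pyGetD pvFACE (PySem.Int.mod card 54) 0 = pvVal card := by
  have h0 : 0 ≤ PySem.Int.mod card 54 := PySem.Int.mod_nonneg _ (by norm_num)
  have h1 : PySem.Int.mod card 54 < 54 := PySem.Int.mod_lt _ (by norm_num)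
  unfold pvVal
  set c := PySem.Int.mod card 54 with hc
  clear_value c
  interval_cases c <;> decide

-- counting-sort invariant: each bucket ends up holding the count of its value
theorem bucket_getD (m : List Int) :
    ∀ (cs : List Int), cs.length = 16 → (∀ x ∈ m, 0 ≤ x ∧ x < 16) →
    (∀ v : Int, 0 ≤ v → v < 16 →
      PySem.List.pyGetD
        (m.foldl (fun cs x => PySem.List.pySetD cs x (PySem.List.pyGetD cs x 0 + 1)) cs) v 0
      = PySem.List.pyGetD cs v 0 + (m.count v : Int)) := by
  induction m with
  | nil => intro cs _ _ v _ _; simp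
  | cons x m ih =>
    intro cs hlen hmem v hv0 hv1
    have hx := hmem x (by simp)
    have hxn : x = ((x.toNat : Nat) : Int) := (Int.toNat_of_nonneg hx.1).symm
    have hxlt : x.toNat < cs.length := by omega
    simp only [List.foldl_cons]
    rw [ih (PySem.List.pySetD cs x (PySem.List.pyGetD cs x 0 + 1))
        (by rw [PySem.List.length_pySetD]; exact hlen)
        (fun y hy => hmem y (by simp [hy])) v hv0 hv1]
    have hvn : v = ((v.toNat : Nat) : Int) := (Int.toNat_of_nonneg hv0).symm
    rw [hxn, hvn, PySem.List.pyGetD_pySetD_natCast _ _ _ _ _ hxlt, ← hxn, ← hvn]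
    by_cases hvx : v = x
    · subst hvx
      rw [if_pos rfl]
      simp; ring
    · rw [if_neg (fun h => hvx (by omega))]
      have : (x == v) = false := by simp [Ne.symm hvx]
      simp [List.count_cons, this]

theorem card_id2card_num_spec : Claim_equal_card_id2card_num := by
  unfold Claim_equal_card_id2card_num
  intro card_id _
  unfold Spec_card_id2card_num card_id2card_num card_id2card_num_alt
  show PySem.List.sorted
      (card_id.foldl (fun acc card =>
        if PySem.Int.mod card 54 < 52 then
          if PySem.Int.mod (PySem.Int.mod card 54) 13 < 12 then
            acc ++ [PySem.Int.mod (PySem.Int.mod card 54) 13 + 2]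
          else acc ++ [1]
        else if PySem.Int.mod card 54 = 52 then acc ++ [14]
        else acc ++ [15]) []) (fun x => x) false
    = (PySem.List.pyRange 1 16 1).foldl (fun out v =>
        out ++ PySem.List.pyRepeat [v]
          (PySem.List.pyGetD
            (card_id.foldl (fun counts card =>
              PySem.List.pySetD counts (PySem.List.pyGetD pvFACE (PySem.Int.mod card 54) 0)
                (PySem.List.pyGetD counts (PySem.List.pyGetD pvFACE (PySem.Int.mod card 54) 0) 0 + 1))
              (PySem.List.pyRepeat [0] 16)) v 0)) []
  -- A's loop appends pvVal card for each card
  rw [PySem.List.foldl_congr_mem card_id _ (fun acc card => acc ++ [pvVal card]) []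
      (fun acc card _ => bodyA_eq acc card),
    PySem.List.foldl_append_singleton_eq_map pvVal card_id [], List.nil_append]
  -- B's counting loop indexes buckets by pvVal card
  rw [PySem.List.foldl_congr_mem card_id _
      (fun cs card => PySem.List.pySetD cs (pvVal card)
        (PySem.List.pyGetD cs (pvVal card) 0 + 1)) (PySem.List.pyRepeat [0] 16)
      (fun cs card _ => by rw [pvFACE_get card]),
    ← List.foldl_map (f := pvVal) (g := fun cs x => PySem.List.pySetD cs x
        (PySem.List.pyGetD cs x 0 + 1)) (l := card_id)
        (init := PySem.List.pyRepeat ([0] : List Int) 16)]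
  set m := card_id.map pvVal with hm
  have hmrange : ∀ x ∈ m, 0 ≤ x ∧ x < 16 := by
    intro x hx
    rcases List.mem_map.mp hx with ⟨card, _, rfl⟩
    have h := pvVal_mem card
    simp only [List.mem_cons, List.not_mem_nil, or_false] at h
    omega
  -- B's output loop concatenates the buckets over 1..15
  have hrange : (PySem.List.pyRange 1 16 1) = ([1,2,3,4,5,6,7,8,9,10,11,12,13,14,15] : List Int) := by decide
  rw [hrange, PySem.List.foldl_append_eq_flatMap, List.nil_append]
  have hflat : ([1,2,3,4,5,6,7,8,9,10,11,12,13,14,15] : List Int).flatMap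
        (fun v => PySem.List.pyRepeat [v]
          (PySem.List.pyGetD (m.foldl (fun cs x => PySem.List.pySetD cs x
            (PySem.List.pyGetD cs x 0 + 1)) (PySem.List.pyRepeat [0] 16)) v 0))
      = ([1,2,3,4,5,6,7,8,9,10,11,12,13,14,15] : List Int).flatMap
          (fun v => List.replicate (m.count v) v) := by
    apply List.flatMap_congr
    intro v hv
    have hv' : 0 ≤ v ∧ v < 16 ∧ PySem.List.pyGetD (PySem.List.pyRepeat ([0]:List Int) 16) v 0 = 0 := by
      fin_cases hv <;> refine ⟨by norm_num, by norm_num, by decide⟩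
    rw [bucket_getD m (PySem.List.pyRepeat [0] 16) (by decide) hmrange v hv'.1 hv'.2.1,
      hv'.2.2, zero_add, PySem.List.pyRepeat_singleton]
    simp
  rw [hflat]
  -- sorted m = concatenated buckets: a ≤-pairwise permutation of m
  apply PySem.List.sorted_id_eq_of_perm_of_pairwise
  · apply perm_flatMap_replicate
    · decide
    · intro x hx
      rcases List.mem_map.mp hx with ⟨card, _, rfl⟩
      exact pvVal_mem card
  · exact pairwise_flatMap_replicate _ _ (by decide)
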